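-- pv_equiv track=rewrite | github.com/ArabelaTso/H-CMP | murphi_analysis/analyser.py | number_type
-- ===== SOURCE A (Python) =====
-- def number_type(origin_dict):
--     new_dic, type_count = {}, {}
--     for p, t in origin_dict.items():
--         if t not in type_count:
--             type_count[t] = 1
--         else:
--             type_count[t] += 1
--         new_dic[p] = '%s_%d' % (t, type_count[t])
--     return new_dic
-- ===== SOURCE B (Python) =====
-- def number_type(origin_dict):
--     # Phase 1: group keys by their type, in insertion order.
--     groups = {}
--     for p, t in origin_dict.items():
--         groups.setdefault(t, []).append(p)
--     # Phase 2: enumerate each group to get the per-type occurrence number.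
--     label = {}
--     for t, ks in groups.items():
--         for i, p in enumerate(ks, 1):
--             label[p] = '%s_%d' % (t, i)
--     # Emit in the original key order.
--     return {p: label[p] for p in origin_dict}
-- ===== Notes on version B (the rewrite author's own statement) =====
-- stated objective: alternative
-- what changed: A's single pass with a running per-type counter is replaced by a two-phase group-then-enumerate structure: first build a dict grouping keys by type, then enumerate each group (starting at 1) to assign suffixes, emitting the result in the original key order; Pre_ only excludes association lists with a duplicate key, which cannot arise from a Python dict argument.
import Mathlib
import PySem

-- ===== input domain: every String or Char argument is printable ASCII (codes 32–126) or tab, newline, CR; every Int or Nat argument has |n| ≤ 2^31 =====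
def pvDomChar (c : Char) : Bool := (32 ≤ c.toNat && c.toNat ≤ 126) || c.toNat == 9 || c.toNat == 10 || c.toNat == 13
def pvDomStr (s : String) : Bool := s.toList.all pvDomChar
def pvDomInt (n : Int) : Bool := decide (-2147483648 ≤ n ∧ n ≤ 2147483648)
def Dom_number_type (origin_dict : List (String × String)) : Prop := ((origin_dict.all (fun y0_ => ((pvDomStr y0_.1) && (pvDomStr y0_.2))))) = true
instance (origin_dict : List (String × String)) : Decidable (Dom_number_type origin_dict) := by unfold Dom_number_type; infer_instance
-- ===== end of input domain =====

-- B replaces A's single running-counter pass by a group-then-enumerate two-phase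
-- structure (group keys by type, enumerate each group, emit in original order);
-- objective: alternative decomposition, same cost.

-- '%s_%d' % (t, c)
def pvFmt (t : String) (c : Int) : String := t ++ "_" ++ PySem.Int.toStr c

-- ===== PORT A =====
-- one loop step of A: update type_count[t] then set new_dic[p] = '%s_%d' % (t, type_count[t])
def pvStepA (st : PySem.Dict String String × PySem.Dict String Int) (pt : String × String) :
    PySem.Dict String String × PySem.Dict String Int :=
  let tc := if st.2.contains pt.2 = false then st.2.insert pt.2 1 else st.2.modify pt.2 0 (· + 1)
  -- type_count[t] is always present after the update, so getD is exact here
  (st.1.insert pt.1 (pvFmt pt.2 (tc.getD pt.2 0)), tc)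

def number_type (origin_dict : List (String × String)) : List (String × String) :=
  (origin_dict.foldl pvStepA (PySem.Dict.empty, PySem.Dict.empty)).1.items

-- ===== PORT B =====
-- phase 1: groups.setdefault(t, []).append(p)  ==  modify t [] (· ++ [p])
def pvGroups (origin_dict : List (String × String)) : PySem.Dict String (List String) :=
  origin_dict.foldl (fun g pt => g.modify pt.2 [] (fun v => v ++ [pt.1])) PySem.Dict.empty

-- phase 2, one group: for i, p in enumerate(ks, 1): label[p] = '%s_%d' % (t, i)
def pvStepLabel (lb : PySem.Dict String String) (tks : String × List String) :
    PySem.Dict String String :=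
  (PySem.List.enumerate tks.2 1).foldl (fun lb ip => lb.insert ip.2 (pvFmt tks.1 ip.1)) lb

def pvLabel (origin_dict : List (String × String)) : PySem.Dict String String :=
  (pvGroups origin_dict).items.foldl pvStepLabel PySem.Dict.empty

-- final comprehension {p: label[p] for p in origin_dict}; every p of origin_dict is in
-- label (it was appended to its type's group), so the getD "" default is never used
def number_type_alt (origin_dict : List (String × String)) : List (String × String) :=
  (origin_dict.foldl
    (fun d pt => d.insert pt.1 ((pvLabel origin_dict).getD pt.1 ""))
    PySem.Dict.empty).items

-- ===== PRECONDITION & SPEC =====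
-- A Python dict cannot contain duplicate keys; Pre_ excludes association lists with a
-- repeated key, on which the two programs' overwrite orders are accidental artefacts.
def Pre_number_type (origin_dict : List (String × String)) : Prop :=
  (origin_dict.map Prod.fst).Nodup

instance (origin_dict : List (String × String)) : Decidable (Pre_number_type origin_dict) := by
  unfold Pre_number_type; infer_instance

def pvWitness_number_type : (List (String × String)) := [("a", "t"), ("b", "t"), ("c", "u")]

def Spec_number_type (origin_dict : List (String × String)) (out : List (String × String)) : Prop :=
  out = number_type_alt origin_dict
instance (origin_dict : List (String × String)) (out : List (String × String)) :
    Decidable (Spec_number_type origin_dict out) := by unfold Spec_number_type; infer_instance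

-- ===== CLAIM (what is proved, stated in full; the proofs are below) =====
def Claim_equal_number_type : Prop :=
  ∀ (origin_dict : List (String × String)), Dom_number_type origin_dict →
    Pre_number_type origin_dict → Spec_number_type origin_dict (number_type origin_dict)

-- ===== LEMMAS AND PROOFS =====

-- the common specification: label each pair with its type's occurrence number,
-- given the list `pre` of types already seen
def pvLabelOf (pre : List String) : List (String × String) → List (String × String)
  | [] => []
  | pt :: rest => (pt.1, pvFmt pt.2 ((pre.count pt.2 : Int) + 1)) :: pvLabelOf (pre ++ [pt.2]) rest

-- A's type_count update keeps the counter invariant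
lemma pv_tc_update (tc : PySem.Dict String Int) (pre : List String) (t : String)
    (h : ∀ u, tc.getD u 0 = ((pre.count u : Nat) : Int)) :
    ∀ u, (if tc.contains t = false then tc.insert t 1 else tc.modify t 0 (· + 1)).getD u 0
      = (((pre ++ [t]).count u : Nat) : Int) := by
  intro u
  by_cases hu : u = t
  · subst hu
    have hcnt : (pre ++ [u]).count u = pre.count u + 1 := by simp
    by_cases hc : tc.contains u = false
    · have h0 : ((pre.count u : Nat) : Int) = 0 := by
        rw [← h u]; exact PySem.Dict.getD_of_not_contains tc 0 hc
      rw [if_pos hc, PySem.Dict.getD_insert_self, hcnt]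
      push_cast
      omega
    · rw [if_neg hc, PySem.Dict.getD_modify_self, h u, hcnt]
      push_cast
      ring
  · have hcnt : (pre ++ [t]).count u = pre.count u := by simp [Ne.symm hu]
    by_cases hc : tc.contains t = false
    · rw [if_pos hc, PySem.Dict.getD_insert_of_ne tc 1 0 hu, h u, hcnt]
    · rw [if_neg hc, PySem.Dict.getD_modify_of_ne tc 0 (· + 1) hu, h u, hcnt]

-- characterization of A's loop
lemma pv_A_main : ∀ (l : List (String × String)) (nd : PySem.Dict String String)
    (tc : PySem.Dict String Int) (pre : List String),
    nd.keys.Nodup → (∀ pt ∈ l, nd.contains pt.1 = false) → (l.map Prod.fst).Nodup →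
    (∀ u, tc.getD u 0 = ((pre.count u : Nat) : Int)) →
    (l.foldl pvStepA (nd, tc)).1.items = nd.items ++ pvLabelOf pre l
  | [], nd, tc, pre, _, _, _, _ => by simp [pvLabelOf]
  | pt :: rest, nd, tc, pre, hnd, hfr, hnodup, htc => by
    obtain ⟨p, t⟩ := pt
    have hfp : nd.contains p = false := hfr (p, t) (by simp)
    have htc' := pv_tc_update tc pre t htc
    have hval : (if tc.contains t = false then tc.insert t 1 else tc.modify t 0 (· + 1)).getD t 0
        = ((pre.count t : Nat) : Int) + 1 := by
      rw [htc' t]; simp [List.count_append]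
    have hrec := pv_A_main rest (nd.insert p (pvFmt t ((pre.count t : Int) + 1)))
      (if tc.contains t = false then tc.insert t 1 else tc.modify t 0 (· + 1)) (pre ++ [t])
      (PySem.Dict.nodup_keys_insert nd p _ hnd)
      (by
        intro q hq
        rw [PySem.Dict.contains_insert]
        rw [List.map_cons, List.nodup_cons] at hnodup
        have hne : q.1 ≠ p := by
          intro he
          have hmem : q.1 ∈ rest.map Prod.fst := List.mem_map_of_mem (f := Prod.fst) hq
          exact hnodup.1 (he ▸ hmem)
        simp [hne, hfr q (List.mem_cons_of_mem _ hq)])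
      (by rw [List.map_cons, List.nodup_cons] at hnodup; exact hnodup.2) htc'
    simp only [List.foldl_cons, pvStepA, hval]
    rw [hrec, PySem.Dict.items_insert_of_not_contains nd _ hfp]
    simp [pvLabelOf]

-- B inner loop: enumerate-and-insert over one (nodup) group
lemma pv_inner (t p : String) : ∀ (ks : List String) (s : Int) (lb : PySem.Dict String String),
    ks.Nodup →
    ((PySem.List.enumerate ks s).foldl (fun lb ip => lb.insert ip.2 (pvFmt t ip.1)) lb).getD p ""
      = if p ∈ ks then pvFmt t (s + ks.idxOf p) else lb.getD p ""
  | [], s, lb, _ => by simp [PySem.List.enumerate_nil]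
  | k :: ks, s, lb, hnd => by
    rw [PySem.List.enumerate_cons, List.foldl_cons]
    rw [pv_inner t p ks (s + 1) (lb.insert k (pvFmt t s)) (List.nodup_cons.mp hnd).2]
    by_cases hpk : p = k
    · subst hpk
      have hnp : p ∉ ks := (List.nodup_cons.mp hnd).1
      simp [hnp, List.idxOf_cons_self, PySem.Dict.getD_insert_self]
    · by_cases hm : p ∈ ks
      · simp only [hm, if_true, List.mem_cons, hpk, false_or]
        rw [List.idxOf_cons_ne ks (Ne.symm hpk)]
        push_cast
        ring_nf
      · simp only [hm, if_false, List.mem_cons, hpk, false_or,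
          PySem.Dict.getD_insert_of_ne lb _ _ hpk]

-- B outer loop over the groups
lemma pv_outer (p t : String) (j : Nat) : ∀ (tks : List (String × List String))
    (lb : PySem.Dict String String),
    (tks.map Prod.fst).Nodup → (∀ q ∈ tks, q.2.Nodup) →
    (∀ q ∈ tks, p ∈ q.2 → q.1 = t ∧ q.2.idxOf p = j) →
    (tks.foldl pvStepLabel lb).getD p ""
      = if tks.any (fun q => decide (p ∈ q.2)) then pvFmt t (1 + (j : Int)) else lb.getD p ""
  | [], lb, _, _, _ => by simp
  | q :: tks, lb, hk, hnd, hspec => by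
    obtain ⟨u, ks⟩ := q
    rw [List.foldl_cons]
    have hksnd : ks.Nodup := hnd (u, ks) (by simp)
    have hstep : (pvStepLabel lb (u, ks)).getD p ""
        = if p ∈ ks then pvFmt u (1 + (ks.idxOf p : Int)) else lb.getD p "" :=
      pv_inner u p ks 1 lb hksnd
    rw [List.map_cons, List.nodup_cons] at hk
    by_cases hm : p ∈ ks
    · obtain ⟨hu, hj⟩ := hspec (u, ks) (by simp) hm
      dsimp only at hu hj
      subst hu
      have hnot : ∀ q' ∈ tks, p ∉ q'.2 := by
        intro q' hq' hm'
        have hu' := (hspec q' (List.mem_cons_of_mem _ hq') hm').1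
        have hmem : q'.1 ∈ tks.map Prod.fst := List.mem_map_of_mem (f := Prod.fst) hq'
        rw [hu'] at hmem
        exact hk.1 hmem
      rw [pv_outer p u j tks (pvStepLabel lb (u, ks)) hk.2
        (fun q' hq' => hnd q' (List.mem_cons_of_mem _ hq'))
        (fun q' hq' hm' => absurd hm' (hnot q' hq'))]
      have hany : (tks.any fun q => decide (p ∈ q.2)) = false := by
        simp only [List.any_eq_false, decide_eq_true_eq]
        exact hnot
      rw [hany, hstep]
      simp [hm, hj]
    · rw [pv_outer p t j tks (pvStepLabel lb (u, ks)) hk.2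
        (fun q' hq' => hnd q' (List.mem_cons_of_mem _ hq'))
        (fun q' hq' hm' => hspec q' (List.mem_cons_of_mem _ hq') hm')]
      rw [hstep, if_neg hm]
      have hd : decide (p ∈ ks) = false := by simp [hm]
      rw [List.any_cons, hd, Bool.false_or]

lemma pv_groups_getD (l : List (String × String)) (u : String) :
    (pvGroups l).getD u [] = (l.filter (fun pt => pt.2 == u)).map Prod.fst := by
  unfold pvGroups
  have : l.foldl (fun g pt => g.modify pt.2 [] (fun v => v ++ [pt.1])) PySem.Dict.empty
      = (l.map Prod.swap).foldl (fun g q => g.modify q.1 [] (fun v => v ++ [q.2]))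
          PySem.Dict.empty := by
    rw [List.foldl_map]
    rfl
  rw [this, PySem.Dict.getD_foldl_modify_append]
  simp [PySem.Dict.getD_empty, List.filter_map, Function.comp_def, Prod.swap]

lemma pv_groups_keys (l : List (String × String)) :
    (pvGroups l).keys = PySem.Set.ofList (l.map Prod.snd) := by
  unfold pvGroups
  rw [PySem.Dict.keys_foldl_modify_key l Prod.snd [] (fun _ pt => (fun v => v ++ [pt.1]))]
  simp [PySem.Dict.keys_empty, PySem.Set.update_nil_left]

lemma pv_groups_nodup (l : List (String × String)) : (pvGroups l).keys.Nodup := by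
  unfold pvGroups
  exact PySem.Dict.nodup_keys_foldl_modify_key l Prod.snd [] (fun _ pt => (fun v => v ++ [pt.1]))
    PySem.Dict.empty (by simp [PySem.Dict.keys_empty])

-- the value label[p] for the (unique) entry (p, t) of the list
lemma pv_label_lookup (l1 l2 : List (String × String)) (p t : String)
    (h : ((l1 ++ (p, t) :: l2).map Prod.fst).Nodup) :
    (pvLabel (l1 ++ (p, t) :: l2)).getD p ""
      = pvFmt t (((l1.map Prod.snd).count t : Int) + 1) := by
  set L := l1 ++ (p, t) :: l2 with hL
  have hmemL : (p, t) ∈ L := by simp [hL]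
  have hfst_inj := List.inj_on_of_nodup_map h
  -- the filtered group of t splits around (p, t)
  have hfilter : L.filter (fun pt => pt.2 == t)
      = l1.filter (fun pt => pt.2 == t) ++ (p, t) :: l2.filter (fun pt => pt.2 == t) := by
    simp [hL, List.filter_append]
  have hpre_sub : ∀ x ∈ l1.filter (fun pt => pt.2 == t), x.1 ∈ l1.map Prod.fst := by
    intro x hx
    exact List.mem_map_of_mem (List.mem_of_mem_filter hx)
  have hnodupL : (L.map Prod.fst).Nodup := h
  have hpnotl1 : p ∉ l1.map Prod.fst := by
    have h2 : (l1.map Prod.fst ++ ((p, t) :: l2).map Prod.fst).Nodup := by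
      rw [← List.map_append, ← hL]; exact h
    intro hmem
    exact (List.disjoint_of_nodup_append h2) hmem (by simp)
  have hidx : ((L.filter (fun pt => pt.2 == t)).map Prod.fst).idxOf p
      = (l1.map Prod.snd).count t := by
    rw [hfilter, List.map_append, List.idxOf_append]
    have hnotin : p ∉ (l1.filter (fun pt => pt.2 == t)).map Prod.fst := by
      intro hmem
      obtain ⟨x, hx, hxe⟩ := List.mem_map.mp hmem
      exact hpnotl1 (hxe ▸ hpre_sub x hx)
    rw [if_neg hnotin]
    simp only [List.map_cons, List.idxOf_cons_self, Nat.zero_add]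
    show ((l1.filter (fun pt => pt.2 == t)).map Prod.fst).length = (l1.map Prod.snd).count t
    simp [List.count_eq_countP, List.countP_map]
    rw [← List.countP_eq_length_filter]
    rfl
  -- apply the outer-loop lemma
  unfold pvLabel
  have hitems : (pvGroups L).items
      = (pvGroups L).keys.map (fun u => (u, (pvGroups L).getD u [])) :=
    PySem.Dict.items_eq_map_keys _ (pv_groups_nodup L) []
  have hkeysnodup : ((pvGroups L).items.map Prod.fst).Nodup := pv_groups_nodup L
  have hgrpnodup : ∀ q ∈ (pvGroups L).items, q.2.Nodup := by
    intro q hq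
    rw [hitems] at hq
    obtain ⟨u, _, rfl⟩ := List.mem_map.mp hq
    rw [pv_groups_getD]
    exact hnodupL.sublist (List.Sublist.map Prod.fst List.filter_sublist)
  have hspec : ∀ q ∈ (pvGroups L).items, p ∈ q.2 →
      q.1 = t ∧ q.2.idxOf p = (l1.map Prod.snd).count t := by
    intro q hq hm
    rw [hitems] at hq
    obtain ⟨u, _, rfl⟩ := List.mem_map.mp hq
    rw [pv_groups_getD] at hm ⊢
    obtain ⟨x, hx, hxe⟩ := List.mem_map.mp hm
    have hxL : x ∈ L := List.mem_of_mem_filter hx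
    have hxu : (x.2 == u) = true := (List.mem_filter.mp hx).2
    have hxeq : x = (p, t) := hfst_inj hxL hmemL (by simpa using hxe)
    have hut : u = t := by
      rw [hxeq] at hxu
      exact (beq_iff_eq.mp hxu).symm
    subst hut
    exact ⟨rfl, hidx⟩
  rw [pv_outer p t ((l1.map Prod.snd).count t) (pvGroups L).items PySem.Dict.empty
    hkeysnodup hgrpnodup hspec]
  have hany : (pvGroups L).items.any (fun q => decide (p ∈ q.2)) = true := by
    have htk : t ∈ (pvGroups L).keys := by
      rw [pv_groups_keys]
      exact (PySem.Set.mem_ofList _ _).mpr (by exact List.mem_map_of_mem hmemL)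
    have : (t, (pvGroups L).getD t []) ∈ (pvGroups L).items := by
      rw [hitems]; exact List.mem_map_of_mem htk
    refine List.any_eq_true.mpr ⟨_, this, ?_⟩
    simp only [decide_eq_true_eq, pv_groups_getD]
    exact List.mem_map_of_mem (List.mem_filter.mpr ⟨hmemL, by simp⟩)
  rw [hany]
  simp only [if_true]
  have : (1 : Int) + ((l1.map Prod.snd).count t : Int)
      = ((l1.map Prod.snd).count t : Int) + 1 := by ring
  rw [this]

-- characterization of B's final comprehension
lemma pv_B_main : ∀ (l2 l1 : List (String × String)),
    (((l1 ++ l2).map Prod.fst).Nodup) →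
    l2.map (fun pt => (pt.1, (pvLabel (l1 ++ l2)).getD pt.1 ""))
      = pvLabelOf (l1.map Prod.snd) l2
  | [], l1, _ => by simp [pvLabelOf]
  | pt :: l2, l1, h => by
    obtain ⟨p, t⟩ := pt
    have hhead := pv_label_lookup l1 l2 p t h
    have htail := pv_B_main l2 (l1 ++ [(p, t)])
      (by simpa using h)
    have hL2 : l1 ++ (p, t) :: l2 = l1 ++ [(p, t)] ++ l2 := by simp
    simp only [List.map_cons, pvLabelOf]
    rw [hhead, hL2, htail]
    simp

-- A equals the common specification
lemma pv_A_eq (l : List (String × String)) (h : (l.map Prod.fst).Nodup) :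
    number_type l = pvLabelOf [] l := by
  unfold number_type
  rw [pv_A_main l PySem.Dict.empty PySem.Dict.empty []
    (by simp [PySem.Dict.keys_empty])
    (fun pt _ => PySem.Dict.contains_empty pt.1) h
    (fun u => by simp [PySem.Dict.getD_empty])]
  rw [show PySem.Dict.empty.items = [] from rfl]; rfl

-- B equals the common specification
lemma pv_B_eq (l : List (String × String)) (h : (l.map Prod.fst).Nodup) :
    number_type_alt l = pvLabelOf [] l := by
  unfold number_type_alt
  rw [PySem.Dict.items_foldl_insert_fresh l Prod.fst
    (fun pt => (pvLabel l).getD pt.1 "") PySem.Dict.empty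
    (fun a _ => PySem.Dict.contains_empty a.1) h]
  rw [show PySem.Dict.empty.items = [] from rfl, List.nil_append]
  have := pv_B_main l [] (by simpa using h)
  simpa using this

-- ===== VERDICT (by name: the statement is the Claim_ definition above) =====
theorem number_type_spec : Claim_equal_number_type := by
  intro l _ hpre
  unfold Spec_number_type
  rw [pv_A_eq l hpre, pv_B_eq l hpre]
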